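-- pv_equiv track=rewrite | github.com/Chaooz/adventofcode | 2025/11/Thor/solution.py | traversePath
-- ===== SOURCE A (Python) =====
-- def traversePath(path, endPath, pathList, cache):
--
--     if path == endPath:
--         return 1
--
--     if path == "out":
--         return 0
--
--     if path in cache:
--         return cache[path]
--
--     valueList = pathList[path]
--
--     total = 0
--     for key in valueList:
--         total += traversePath(key, endPath,pathList, cache)
--
--     cache[path] = total
--     return total
-- ===== SOURCE B (Python) =====
-- def traversePath(path, endPath, pathList, cache):
--
--     if path == endPath:
--         return 1
--
--     if path == "out":
--         return 0
--
--     if path in cache: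
--         return cache[path]
--
--     # bottom-up fixpoint: repeatedly sweep pathList, resolving every node whose
--     # successors are all already known, until the queried node is cached
--     def known(s):
--         if s == endPath:
--             return 1
--         if s == "out":
--             return 0
--         return cache.get(s)
--
--     changed = True
--     while changed and path not in cache:
--         changed = False
--         for node, succs in pathList.items():
--             if node == endPath or node == "out" or node in cache:
--                 continue
--             vals = [known(s) for s in succs]
--             if all(v is not None for v in vals):
--                 cache[node] = sum(vals)
--                 changed = True
--
--     return cache[path]
-- ===== Notes on version B (the rewrite author's own statement) =====
-- stated objective: alternative
-- what changed: Replaces A's top-down memoized recursion with an iterative bottom-up fixpoint: repeated sweeps over pathList resolve every node whose successors are all already known, until the queried node is cached; the return value is identical wherever A returns (cache side effects can differ: B may also cache resolvable nodes A never visits).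
import Mathlib
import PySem

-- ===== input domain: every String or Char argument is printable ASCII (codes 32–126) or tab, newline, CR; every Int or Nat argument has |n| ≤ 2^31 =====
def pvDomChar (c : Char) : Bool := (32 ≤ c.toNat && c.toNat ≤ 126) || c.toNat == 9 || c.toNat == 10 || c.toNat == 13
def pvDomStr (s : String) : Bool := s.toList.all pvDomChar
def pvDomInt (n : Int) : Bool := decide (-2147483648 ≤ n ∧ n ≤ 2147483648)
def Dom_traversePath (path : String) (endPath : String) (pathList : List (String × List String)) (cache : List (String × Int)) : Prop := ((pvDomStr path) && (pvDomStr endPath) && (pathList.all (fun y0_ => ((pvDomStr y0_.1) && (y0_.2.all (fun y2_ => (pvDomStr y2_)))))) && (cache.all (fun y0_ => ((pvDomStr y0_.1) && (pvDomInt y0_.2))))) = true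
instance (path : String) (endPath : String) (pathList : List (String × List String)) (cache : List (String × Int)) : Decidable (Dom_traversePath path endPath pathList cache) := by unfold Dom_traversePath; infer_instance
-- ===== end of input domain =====

-- B replaces A's top-down memoized recursion by an iterative bottom-up fixpoint (repeated
-- sweeps over pathList resolving every node whose successors are all known); objective:
-- alternative. Both Pythons mutate `cache`; the mutations can differ (B may also cache
-- resolvable nodes A never visits), so the equivalence claimed is about the RETURN value.

-- ===== PORT A =====
-- A's recursion is ported with a fuel counter (pathList.length + 1 always suffices on Pre_);
-- the fuel-0 / missing-key defaults are never reached on Pre_ (Python raises there).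
def pvGoA (ep : String) (P : PySem.Dict String (List String)) :
    Nat → String → PySem.Dict String Int → Int × PySem.Dict String Int
  | 0, _, c => (0, c)
  | fuel+1, path, c =>
    if path = ep then (1, c)
    else if path = "out" then (0, c)
    else
      match c.get? path with
      | some v => (v, c)
      | none =>
        let valueList := (P.get? path).getD []
        let r := valueList.foldl (fun acc key =>
            (acc.1 + (pvGoA ep P fuel key acc.2).1, (pvGoA ep P fuel key acc.2).2)) ((0 : Int), c)
        (r.1, r.2.insert path r.1)

def traversePath (path : String) (endPath : String) (pathList : List (String × List String)) (cache : List (String × Int)) : Int :=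
  (pvGoA endPath (PySem.Dict.mk pathList) (pathList.length + 1) path (PySem.Dict.mk cache)).1

-- ===== PORT B =====
-- known(s) of Source B: the value of s readable right now (none = not yet known)
def pvValB (ep : String) (c : PySem.Dict String Int) (s : String) : Option Int :=
  if s = ep then some 1 else if s = "out" then some 0 else c.get? s

-- one `for node, succs in pathList.items()` sweep of Source B; the Bool is `changed`
def pvSweepB (ep : String) : List (String × List String) → PySem.Dict String Int → PySem.Dict String Int × Bool
  | [], c => (c, false)
  | e :: rest, c =>
    if e.1 = ep ∨ e.1 = "out" ∨ c.contains e.1 then pvSweepB ep rest c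
    else
      let vals := e.2.map (pvValB ep c)
      if vals.all Option.isSome then
        ((pvSweepB ep rest (c.insert e.1 ((vals.map (fun o => o.getD 0)).sum))).1, true)
      else pvSweepB ep rest c

-- the `while changed and path not in cache` loop of Source B; each changed sweep caches at
-- least one new pathList key, so fuel pathList.length + 1 always reaches the fixpoint
def pvLoopB (ep : String) (items : List (String × List String)) :
    Nat → String → PySem.Dict String Int → PySem.Dict String Int
  | 0, _, c => c
  | f+1, p, c =>
    if c.contains p then c
    else
      let r := pvSweepB ep items c
      if r.2 then pvLoopB ep items f p r.1 else r.1

def traversePath_alt (path : String) (endPath : String) (pathList : List (String × List String)) (cache : List (String × Int)) : Int :=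
  if path = endPath then 1
  else if path = "out" then 0
  else
    match (PySem.Dict.mk cache).get? path with
    | some v => v
    | none =>
      (pvLoopB endPath pathList (pathList.length + 1) path (PySem.Dict.mk cache)).getD path 0

-- ===== PRECONDITION & SPEC =====
-- s is resolvable within depth n: it is endPath, "out", an initially cached key, or a
-- pathList key all of whose successors are resolvable within depth n-1 (pure graph shape;
-- depth pathList.length saturates, so this is exactly "the recursion grounds out")
def pvResolvable (ep : String) (C0 : PySem.Dict String Int) (P : PySem.Dict String (List String)) :
    Nat → String → Bool
  | 0, s => s == ep || s == "out" || C0.contains s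
  | n+1, s => pvResolvable ep C0 P n s ||
      (match P.get? s with
       | some vs => vs.all (pvResolvable ep C0 P n)
       | none => false)

-- Pre_ = exactly the inputs on which Python A returns: pathList is a Python dict (so its
-- keys are distinct — duplicate-key association lists cannot arise from a dict), and path
-- is resolvable; elsewhere A raises (KeyError on a dangling node, RecursionError on a cycle).
def Pre_traversePath (path : String) (endPath : String) (pathList : List (String × List String)) (cache : List (String × Int)) : Prop :=
  (pathList.map Prod.fst).Nodup ∧
    pvResolvable endPath (PySem.Dict.mk cache) (PySem.Dict.mk pathList) pathList.length path = true

instance (path : String) (endPath : String) (pathList : List (String × List String)) (cache : List (String × Int)) : Decidable (Pre_traversePath path endPath pathList cache) := by unfold Pre_traversePath; infer_instance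

def pvWitness_traversePath : String × String × (List (String × List String)) × (List (String × Int)) :=
  ("a", "z", [("a", ["z", "out", "b"]), ("b", ["z"])], [])

def Spec_traversePath (path : String) (endPath : String) (pathList : List (String × List String)) (cache : List (String × Int)) (out : Int) : Prop := out = traversePath_alt path endPath pathList cache
instance (path : String) (endPath : String) (pathList : List (String × List String)) (cache : List (String × Int)) (out : Int) : Decidable (Spec_traversePath path endPath pathList cache out) := by unfold Spec_traversePath; infer_instance

-- ===== CLAIM (what is proved, stated in full; the proofs are below) =====
def Claim_equal_traversePath : Prop := ∀ (path : String) (endPath : String) (pathList : List (String × List String)) (cache : List (String × Int)), Dom_traversePath path endPath pathList cache → Pre_traversePath path endPath pathList cache → Spec_traversePath path endPath pathList cache (traversePath path endPath pathList cache)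

-- ===== LEMMAS AND PROOFS =====

-- the stable value of a resolvable node: pvV is the depth-n approximation
def pvV (ep : String) (C0 : PySem.Dict String Int) (P : PySem.Dict String (List String)) :
    Nat → String → Int
  | 0, s => if s = ep then 1 else if s = "out" then 0 else C0.getD s 0
  | n+1, s =>
    if s = ep then 1 else if s = "out" then 0 else
      match C0.get? s with
      | some v => v
      | none =>
        match P.get? s with
        | some vs => (vs.map (pvV ep C0 P n)).sum
        | none => 0

def pvStable (ep : String) (C0 : PySem.Dict String Int) (P : PySem.Dict String (List String))
    (k : String) (v : Int) : Prop :=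
  ∃ n, pvResolvable ep C0 P n k = true ∧ ∀ m, n ≤ m → pvV ep C0 P m k = v

theorem pvResolvable_succ (ep : String) (C0 : PySem.Dict String Int) (P : PySem.Dict String (List String))
    (n : Nat) (s : String) (h : pvResolvable ep C0 P n s = true) :
    pvResolvable ep C0 P (n+1) s = true := by
  simp [pvResolvable, h]

theorem pvResolvable_mono (ep : String) (C0 : PySem.Dict String Int) (P : PySem.Dict String (List String))
    {n m : Nat} (hnm : n ≤ m) (s : String) (h : pvResolvable ep C0 P n s = true) :
    pvResolvable ep C0 P m s = true := by
  induction m with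
  | zero => exact (Nat.le_zero.mp hnm) ▸ h
  | succ m ih =>
    rcases Nat.lt_or_ge n (m+1) with hlt | hge
    · exact pvResolvable_succ _ _ _ _ _ (ih (by omega))
    · have : n = m + 1 := by omega
      exact this ▸ h

theorem pvStable_unique (ep : String) (C0 : PySem.Dict String Int) (P : PySem.Dict String (List String))
    (k : String) (v w : Int) (hv : pvStable ep C0 P k v) (hw : pvStable ep C0 P k w) : v = w := by
  rcases hv with ⟨n1, _, h1⟩
  rcases hw with ⟨n2, _, h2⟩
  rw [← h1 (max n1 n2) (le_max_left ..), h2 (max n1 n2) (le_max_right ..)]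

theorem pvStable_ep (ep : String) (C0 : PySem.Dict String Int) (P : PySem.Dict String (List String)) :
    pvStable ep C0 P ep 1 := by
  refine ⟨0, by simp [pvResolvable], fun m _ => ?_⟩
  cases m <;> simp [pvV]

theorem pvStable_out (ep : String) (C0 : PySem.Dict String Int) (P : PySem.Dict String (List String))
    (h : "out" ≠ ep) : pvStable ep C0 P "out" 0 := by
  refine ⟨0, by simp [pvResolvable], fun m _ => ?_⟩
  cases m <;> simp [pvV, h]

theorem pvStable_cached (ep : String) (C0 : PySem.Dict String Int) (P : PySem.Dict String (List String))
    (k : String) (v : Int) (h1 : k ≠ ep) (h2 : k ≠ "out") (hc : C0.get? k = some v) :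
    pvStable ep C0 P k v := by
  refine ⟨0, ?_, fun m _ => ?_⟩
  · simp [pvResolvable, PySem.Dict.contains_eq_isSome_get?, hc]
  · cases m <;> simp [pvV, h1, h2, hc, PySem.Dict.getD_eq_get?_getD]

-- a list of stable successor values has a common stabilisation depth
theorem pvStable_list (ep : String) (C0 : PySem.Dict String Int) (P : PySem.Dict String (List String))
    (vs : List String) (ws : List Int) (h : List.Forall₂ (pvStable ep C0 P) vs ws) :
    ∃ N, (∀ t ∈ vs, pvResolvable ep C0 P N t = true) ∧
      ∀ m, N ≤ m → vs.map (pvV ep C0 P m) = ws := by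
  induction h with
  | nil => exact ⟨0, by simp, by simp⟩
  | @cons a b l l' hab _ ih =>
    rcases hab with ⟨n1, hr1, hv1⟩
    rcases ih with ⟨N, hrN, hvN⟩
    refine ⟨max n1 N, fun t ht => ?_, fun m hm => ?_⟩
    · rcases List.mem_cons.mp ht with h | h
      · exact h ▸ pvResolvable_mono ep C0 P (le_max_left ..) a hr1
      · exact pvResolvable_mono ep C0 P (le_max_right ..) t (hrN t h)
    · simp only [List.map_cons]
      rw [hv1 m (le_trans (le_max_left ..) hm), hvN m (le_trans (le_max_right ..) hm)]

theorem pvStable_node (ep : String) (C0 : PySem.Dict String Int) (P : PySem.Dict String (List String))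
    (k : String) (vs : List String) (ws : List Int)
    (h1 : k ≠ ep) (h2 : k ≠ "out") (hc : C0.get? k = none) (hp : P.get? k = some vs)
    (hws : List.Forall₂ (pvStable ep C0 P) vs ws) :
    pvStable ep C0 P k ws.sum := by
  rcases pvStable_list ep C0 P vs ws hws with ⟨N, hrN, hvN⟩
  refine ⟨N + 1, ?_, fun m hm => ?_⟩
  · simp only [pvResolvable, hp, Bool.or_eq_true]
    exact Or.inr (List.all_eq_true.mpr hrN)
  · obtain ⟨m', rfl⟩ : ∃ m', m = m' + 1 := ⟨m - 1, by omega⟩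
    simp only [pvV, if_neg h1, if_neg h2, hc, hp]
    rw [hvN m' (by omega)]

-- peeling: a resolvable non-base node has a pathList entry with resolvable successors
theorem pvResolvable_peel (ep : String) (C0 : PySem.Dict String Int) (P : PySem.Dict String (List String))
    (n : Nat) (s : String) (h : pvResolvable ep C0 P n s = true) :
    (s = ep ∨ s = "out" ∨ C0.contains s = true) ∨
      ∃ vs, P.get? s = some vs ∧ ∀ t ∈ vs, pvResolvable ep C0 P (n - 1) t = true := by
  induction n with
  | zero =>
    simp only [pvResolvable, Bool.or_eq_true, beq_iff_eq] at h
    tauto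
  | succ n ih =>
    simp only [pvResolvable, Bool.or_eq_true] at h
    rcases h with h | h
    · rcases ih h with h' | ⟨vs, hvs, hall⟩
      · exact Or.inl h'
      · exact Or.inr ⟨vs, hvs, fun t ht =>
          pvResolvable_mono ep C0 P (by omega) t (hall t ht)⟩
    · rcases hg : P.get? s with _ | vs
      · rw [hg] at h; simp at h
      · rw [hg] at h
        exact Or.inr ⟨vs, rfl, fun t ht => by
          have := List.all_eq_true.mp h t ht
          simpa using this⟩

-- the A-side/B-side cache invariant: every readable binding carries the stable value,
-- and the cache dominates the initial one
def pvCons (ep : String) (C0 : PySem.Dict String Int) (P : PySem.Dict String (List String))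
    (c : PySem.Dict String Int) : Prop :=
  (∀ k v, k ≠ ep → k ≠ "out" → c.get? k = some v → pvStable ep C0 P k v) ∧
  (∀ k, (C0.get? k).isSome → (c.get? k).isSome)

theorem pvCons_init (ep : String) (C0 : PySem.Dict String Int) (P : PySem.Dict String (List String)) :
    pvCons ep C0 P C0 :=
  ⟨fun k v h1 h2 hc => pvStable_cached ep C0 P k v h1 h2 hc, fun _ h => h⟩

theorem pvCons_insert (ep : String) (C0 : PySem.Dict String Int) (P : PySem.Dict String (List String))
    (c : PySem.Dict String Int) (k : String) (v : Int)
    (hg : pvCons ep C0 P c) (hv : pvStable ep C0 P k v) : pvCons ep C0 P (c.insert k v) := by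
  constructor
  · intro j w hj1 hj2 hjw
    rw [PySem.Dict.get?_insert] at hjw
    split at hjw
    · rename_i hjk; subst hjk; exact (Option.some_inj.mp hjw) ▸ hv
    · exact hg.1 j w hj1 hj2 hjw
  · intro j hj
    rw [PySem.Dict.get?_insert]
    split
    · rfl
    · exact hg.2 j hj

-- ===== A-side main lemma =====
theorem pv_mainA (ep : String) (C0 : PySem.Dict String Int) (P : PySem.Dict String (List String)) :
    ∀ fuel path c, pvCons ep C0 P c → 1 ≤ fuel →
      ((c.get? path).isSome ∨ ∃ n, n < fuel ∧ pvResolvable ep C0 P n path = true) →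
      pvStable ep C0 P path (pvGoA ep P fuel path c).1 ∧ pvCons ep C0 P (pvGoA ep P fuel path c).2 := by
  intro fuel
  induction fuel with
  | zero => intro path c _ h; omega
  | succ fuel ih =>
    intro path c hg _ hp
    by_cases h1 : path = ep
    · subst h1; simpa [pvGoA] using ⟨pvStable_ep _ C0 P, hg⟩
    by_cases h2 : path = "out"
    · subst h2; simpa [pvGoA, h1] using ⟨pvStable_out ep C0 P h1, hg⟩
    rcases hget : c.get? path with _ | v
    · -- cache miss: path is resolvable and not base, so it has an entry; recurse
      rcases hp with h | ⟨n, hn, hres⟩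
      · rw [hget] at h; simp at h
      have hC0 : C0.get? path = none := by
        rcases hh : C0.get? path with _ | w
        · rfl
        · have := hg.2 path (by rw [hh]; rfl)
          rw [hget] at this; simp at this
      rcases pvResolvable_peel ep C0 P n path hres with hbase | ⟨vs, hvs, hall⟩
      · rcases hbase with h | h | h
        · exact absurd h h1
        · exact absurd h h2
        · rw [PySem.Dict.contains_eq_isSome_get?, hC0] at h; simp at h
      -- n ≥ 1: resolvable 0 would be base (just shown impossible), so fuel ≥ 1 for children
      have hn1 : 1 ≤ n := by
        rcases Nat.eq_zero_or_pos n with h0 | h0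
        · subst h0
          rcases pvResolvable_peel ep C0 P 0 path hres with hbase | ⟨vs', hvs', _⟩
          · rcases hbase with h | h | h
            · exact absurd h h1
            · exact absurd h h2
            · rw [PySem.Dict.contains_eq_isSome_get?, hC0] at h; simp at h
          · -- at depth 0 the peel is always base
            simp only [pvResolvable, Bool.or_eq_true, beq_iff_eq] at hres
            rcases hres with (h | h) | h
            · exact absurd h h1
            · exact absurd h h2
            · rw [PySem.Dict.contains_eq_isSome_get?, hC0] at h; simp at h
        · exact h0
      have hfuel1 : 1 ≤ fuel := by omega
      -- the successor fold
      have hloop : ∀ (l : List String), (∀ s ∈ l, s ∈ vs) → ∀ (t0 : Int) (c0 : PySem.Dict String Int),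
          pvCons ep C0 P c0 →
          ∃ ws, List.Forall₂ (pvStable ep C0 P) l ws ∧
            (l.foldl (fun acc key =>
              (acc.1 + (pvGoA ep P fuel key acc.2).1, (pvGoA ep P fuel key acc.2).2)) (t0, c0)).1
              = t0 + ws.sum ∧
            pvCons ep C0 P
              (l.foldl (fun acc key =>
                (acc.1 + (pvGoA ep P fuel key acc.2).1, (pvGoA ep P fuel key acc.2).2)) (t0, c0)).2 := by
        intro l
        induction l with
        | nil => intro _ t0 c0 hg0; exact ⟨[], List.Forall₂.nil, by simp, hg0⟩
        | cons a l ihl =>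
          intro hsub t0 c0 hg0
          have hchild : (c0.get? a).isSome ∨ ∃ m, m < fuel ∧ pvResolvable ep C0 P m a = true :=
            Or.inr ⟨n - 1, by omega, hall a (hsub a (by simp))⟩
          have ha := ih a c0 hg0 hfuel1 hchild
          rcases ihl (fun s hs => hsub s (List.mem_cons_of_mem a hs))
            (t0 + (pvGoA ep P fuel a c0).1) (pvGoA ep P fuel a c0).2 ha.2 with ⟨ws, hf, hsum, hcons⟩
          refine ⟨(pvGoA ep P fuel a c0).1 :: ws, List.Forall₂.cons ha.1 hf, ?_, hcons⟩
          simp only [List.foldl_cons] at hsum ⊢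
          rw [hsum]
          simp [List.sum_cons]
          ring
      rcases hloop vs (fun s hs => hs) 0 c hg with ⟨ws, hf, hsum, hcons⟩
      have hstable : pvStable ep C0 P path ws.sum :=
        pvStable_node ep C0 P path vs ws h1 h2 hC0 hvs hf
      constructor
      · simp only [pvGoA, if_neg h1, if_neg h2, hget, hvs, Option.getD_some]
        rw [hsum, zero_add]
        exact hstable
      · simp only [pvGoA, if_neg h1, if_neg h2, hget, hvs, Option.getD_some]
        refine pvCons_insert ep C0 P _ path _ hcons ?_
        rw [hsum, zero_add]
        exact hstable
    · -- cache hit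
      simpa [pvGoA, h1, h2, hget] using ⟨hg.1 path v h1 h2 hget, hg⟩

-- ===== B-side lemmas =====
theorem pvSweepB_mono (ep : String) (items : List (String × List String))
    (c : PySem.Dict String Int) (k : String) (v : Int) (h : c.get? k = some v) :
    ((pvSweepB ep items c).1).get? k = some v := by
  induction items generalizing c with
  | nil => simpa [pvSweepB]
  | cons e rest ih =>
    simp only [pvSweepB]
    split
    · exact ih c h
    · rename_i hskip
      split
      · refine ih _ ?_
        have hne : k ≠ e.1 := by
          intro hk
          exact hskip (Or.inr (Or.inr (by
            rw [PySem.Dict.contains_eq_isSome_get?, ← hk, h]; rfl)))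
        rw [PySem.Dict.get?_insert_of_ne _ _ hne]
        exact h
      · exact ih c h

theorem pvSweepB_contains_mono (ep : String) (items : List (String × List String))
    (c : PySem.Dict String Int) (k : String) (h : c.contains k = true) :
    ((pvSweepB ep items c).1).contains k = true := by
  rw [PySem.Dict.contains_eq_isSome_get?] at h
  rcases Option.isSome_iff_exists.mp h with ⟨v, hv⟩
  rw [PySem.Dict.contains_eq_isSome_get?, pvSweepB_mono ep items c k v hv]
  rfl

theorem pvValB_stable (ep : String) (C0 : PySem.Dict String Int) (P : PySem.Dict String (List String))
    (c : PySem.Dict String Int) (hc : pvCons ep C0 P c) (s : String) (w : Int)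
    (h : pvValB ep c s = some w) : pvStable ep C0 P s w := by
  unfold pvValB at h
  split at h
  · rename_i hs; subst hs
    exact (Option.some_inj.mp h) ▸ pvStable_ep _ C0 P
  · split at h
    · rename_i hs1 hs2; subst hs2
      exact (Option.some_inj.mp h) ▸ pvStable_out ep C0 P hs1
    · rename_i hs1 hs2
      exact hc.1 s w hs1 hs2 h

theorem pvValB_forall₂ (ep : String) (C0 : PySem.Dict String Int) (P : PySem.Dict String (List String))
    (c : PySem.Dict String Int) (hc : pvCons ep C0 P c) :
    ∀ (vs : List String), (vs.map (pvValB ep c)).all Option.isSome = true →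
      List.Forall₂ (pvStable ep C0 P) vs ((vs.map (pvValB ep c)).map (fun o => o.getD 0)) := by
  intro vs
  induction vs with
  | nil => intro _; simp
  | cons a l ih =>
    intro hall
    simp only [List.map_cons, List.all_cons, Bool.and_eq_true] at hall
    rcases Option.isSome_iff_exists.mp hall.1 with ⟨w, hw⟩
    simp only [List.map_cons, hw, Option.getD_some]
    exact List.Forall₂.cons (pvValB_stable ep C0 P c hc a w hw) (ih hall.2)

theorem pvSweepB_cons (ep : String) (C0 : PySem.Dict String Int) (P : PySem.Dict String (List String))
    (items : List (String × List String))
    (hitems : ∀ e ∈ items, P.get? e.1 = some e.2) :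
    ∀ c, pvCons ep C0 P c → pvCons ep C0 P (pvSweepB ep items c).1 := by
  induction items with
  | nil => intro c hc; simpa [pvSweepB]
  | cons e rest ih =>
    intro c hc
    have hrest : ∀ e' ∈ rest, P.get? e'.1 = some e'.2 :=
      fun e' he' => hitems e' (List.mem_cons_of_mem e he')
    simp only [pvSweepB]
    split
    · exact ih hrest c hc
    · rename_i hskip
      have hskip1 : e.1 ≠ ep := fun h => hskip (Or.inl h)
      have hskip2 : e.1 ≠ "out" := fun h => hskip (Or.inr (Or.inl h))
      have hskip3 : ¬ c.contains e.1 = true := fun h => hskip (Or.inr (Or.inr h))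
      split
      · rename_i hall
        refine ih hrest _ (pvCons_insert ep C0 P c e.1 _ hc ?_)
        have hC0 : C0.get? e.1 = none := by
          rcases hh : C0.get? e.1 with _ | w
          · rfl
          · have := hc.2 e.1 (by rw [hh]; rfl)
            rw [← PySem.Dict.contains_eq_isSome_get?] at this
            exact absurd this hskip3
        exact pvStable_node ep C0 P e.1 e.2 _ hskip1 hskip2 hC0
          (hitems e (List.mem_cons_self ..))
          (pvValB_forall₂ ep C0 P c hc e.2 hall)
      · exact ih hrest c hc

theorem pvSweepB_covers (ep : String) :
    ∀ (items : List (String × List String)) (c : PySem.Dict String Int) (s : String) (vs : List String),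
      (s, vs) ∈ items → s ≠ ep → s ≠ "out" →
      (∀ t ∈ vs, t = ep ∨ t = "out" ∨ c.contains t = true) →
      ((pvSweepB ep items c).1).contains s = true := by
  intro items
  induction items with
  | nil => intro c s vs h; simp at h
  | cons e rest ih =>
    intro c s vs hmem h1 h2 hts
    rcases List.mem_cons.mp hmem with heq | hmem'
    · -- this is the entry for s
      simp only [pvSweepB]
      subst heq
      split
      · rename_i hskip
        rcases hskip with h | h | h
        · exact absurd h h1
        · exact absurd h h2
        · exact pvSweepB_contains_mono ep rest c s h
      · rename_i hskip
        have hall : ((vs).map (pvValB ep c)).all Option.isSome = true := by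
          refine List.all_eq_true.mpr ?_
          intro o ho
          rcases List.mem_map.mp ho with ⟨t, ht, rfl⟩
          by_cases hte : t = ep
          · simp [pvValB, hte]
          · by_cases hto : t = "out"
            · subst hto
              simp only [pvValB]
              split
              · rfl
              · simp
            · rcases hts t ht with h | h | h
              · exact absurd h hte
              · exact absurd h hto
              · rw [PySem.Dict.contains_eq_isSome_get?] at h
                rcases Option.isSome_iff_exists.mp h with ⟨w, hw⟩
                simp [pvValB, hte, hto, hw]
        simp only [hall, if_pos]
        exact pvSweepB_contains_mono ep rest _ s (by
          rw [PySem.Dict.contains_eq_isSome_get?, PySem.Dict.get?_insert_self]; rfl)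
    · -- s sits further right; the head step only grows the cache
      simp only [pvSweepB]
      split
      · exact ih c s vs hmem' h1 h2 hts
      · split
        · refine ih _ s vs hmem' h1 h2 (fun t ht => ?_)
          rcases hts t ht with h | h | h
          · exact Or.inl h
          · exact Or.inr (Or.inl h)
          · refine Or.inr (Or.inr ?_)
            rw [PySem.Dict.contains_insert, h, Bool.or_true]
        · exact ih c s vs hmem' h1 h2 hts

def pvCovered (ep : String) (C0 : PySem.Dict String Int) (P : PySem.Dict String (List String))
    (c : PySem.Dict String Int) (n : Nat) : Prop :=
  ∀ s, pvResolvable ep C0 P n s = true → s = ep ∨ s = "out" ∨ c.contains s = true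

theorem pvCovered_zero (ep : String) (C0 : PySem.Dict String Int) (P : PySem.Dict String (List String)) :
    pvCovered ep C0 P C0 0 := by
  intro s hs
  simp only [pvResolvable, Bool.or_eq_true, beq_iff_eq] at hs
  tauto

theorem pvSweepB_covered (ep : String) (C0 : PySem.Dict String Int) (P : PySem.Dict String (List String))
    (items : List (String × List String))
    (hitems : ∀ s vs, P.get? s = some vs → (s, vs) ∈ items)
    (c : PySem.Dict String Int) (n : Nat) (hcov : pvCovered ep C0 P c n) :
    pvCovered ep C0 P (pvSweepB ep items c).1 (n + 1) := by
  intro s hs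
  rcases pvResolvable_peel ep C0 P (n+1) s hs with hbase | ⟨vs, hvs, hall⟩
  · have h0 : pvResolvable ep C0 P 0 s = true := by
      simp only [pvResolvable, Bool.or_eq_true, beq_iff_eq]
      tauto
    rcases hcov s (pvResolvable_mono ep C0 P (Nat.zero_le n) s h0) with h | h | h
    · exact Or.inl h
    · exact Or.inr (Or.inl h)
    · exact Or.inr (Or.inr (pvSweepB_contains_mono ep items c s h))
  · by_cases h1 : s = ep
    · exact Or.inl h1
    by_cases h2 : s = "out"
    · exact Or.inr (Or.inl h2)
    refine Or.inr (Or.inr ?_)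
    refine pvSweepB_covers ep items c s vs (hitems s vs hvs) h1 h2 (fun t ht => ?_)
    exact hcov t (by simpa using hall t ht)

theorem pvSweepB_unchanged (ep : String) :
    ∀ (items : List (String × List String)) (c : PySem.Dict String Int),
      (pvSweepB ep items c).2 = false → (pvSweepB ep items c).1 = c := by
  intro items
  induction items with
  | nil => intro c _; rfl
  | cons e rest ih =>
    intro c h
    simp only [pvSweepB] at h ⊢
    by_cases hskip : e.1 = ep ∨ e.1 = "out" ∨ c.contains e.1 = true
    · rw [if_pos hskip] at h ⊢
      exact ih c h
    · rw [if_neg hskip] at h ⊢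
      by_cases hall : ((e.2.map (pvValB ep c)).all Option.isSome) = true
      · rw [if_pos hall] at h
        simp at h
      · rw [if_neg hall] at h ⊢
        exact ih c h

theorem pvCovered_of_unchanged (ep : String) (C0 : PySem.Dict String Int)
    (P : PySem.Dict String (List String)) (items : List (String × List String))
    (hitems : ∀ s vs, P.get? s = some vs → (s, vs) ∈ items)
    (c : PySem.Dict String Int) (hun : (pvSweepB ep items c).2 = false)
    (n : Nat) (hcov : pvCovered ep C0 P c n) :
    ∀ m, pvCovered ep C0 P c (n + m) := by
  intro m
  induction m with
  | zero => exact hcov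
  | succ m ihm =>
    have := pvSweepB_covered ep C0 P items hitems c (n + m) ihm
    rwa [pvSweepB_unchanged ep items c hun] at this

theorem pv_loopB (ep : String) (C0 : PySem.Dict String Int) (P : PySem.Dict String (List String))
    (items : List (String × List String))
    (hitems : ∀ s vs, P.get? s = some vs → (s, vs) ∈ items)
    (hitems' : ∀ e ∈ items, P.get? e.1 = some e.2) (p : String) :
    ∀ (f : Nat) (c : PySem.Dict String Int) (n : Nat), pvCons ep C0 P c → pvCovered ep C0 P c n →
      pvCons ep C0 P (pvLoopB ep items f p c) ∧
        (pvResolvable ep C0 P (n + f) p = true →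
          p = ep ∨ p = "out" ∨ (pvLoopB ep items f p c).contains p = true) := by
  intro f
  induction f with
  | zero =>
    intro c n hc hcov
    exact ⟨hc, fun h => hcov p h⟩
  | succ f ihf =>
    intro c n hc hcov
    simp only [pvLoopB]
    split
    · rename_i hcp
      exact ⟨hc, fun _ => Or.inr (Or.inr hcp)⟩
    · have hc' : pvCons ep C0 P (pvSweepB ep items c).1 :=
        pvSweepB_cons ep C0 P items hitems' c hc
      have hcov' : pvCovered ep C0 P (pvSweepB ep items c).1 (n + 1) :=
        pvSweepB_covered ep C0 P items hitems c n hcov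
      split
      · rename_i hch
        have := ihf (pvSweepB ep items c).1 (n + 1) hc' hcov'
        refine ⟨this.1, fun h => this.2 ?_⟩
        have : n + (f + 1) = n + 1 + f := by omega
        rwa [this] at h
      · rename_i hch
        have hun : (pvSweepB ep items c).2 = false := by
          rcases hb : (pvSweepB ep items c).2 with _ | _
          · rfl
          · exact absurd hb hch
        rw [pvSweepB_unchanged ep items c hun]
        refine ⟨hc, fun h => ?_⟩
        exact pvCovered_of_unchanged ep C0 P items hitems c hun n hcov (f + 1) p h

-- ===== VERDICT (by name: the statement is the Claim_ definition above) =====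
theorem pv_items_mk (pathList : List (String × List String)) :
    ∀ s vs, (PySem.Dict.mk pathList).get? s = some vs → (s, vs) ∈ pathList :=
  fun _ _ h => PySem.Dict.mem_items_of_get?_eq_some _ h

theorem pv_items_mk' (pathList : List (String × List String))
    (hnd : (pathList.map Prod.fst).Nodup) :
    ∀ e ∈ pathList, (PySem.Dict.mk pathList).get? e.1 = some e.2 := by
  intro e he
  exact PySem.Dict.get?_of_mem_items _ (by exact he) (by simpa [PySem.Dict.keys] using hnd)

theorem traversePath_spec : Claim_equal_traversePath := by
  intro path endPath pathList cache _ hpre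
  rcases hpre with ⟨hnd, hres⟩
  unfold Spec_traversePath traversePath traversePath_alt
  by_cases h1 : path = endPath
  · simp [pvGoA, h1]
  by_cases h2 : path = "out"
  · subst h2; simp [pvGoA, h1]
  rcases hget : (PySem.Dict.mk cache).get? path with _ | v
  · -- not initially cached: both sides compute the stable value of path
    have hconsA := pv_mainA endPath (PySem.Dict.mk cache) (PySem.Dict.mk pathList)
      (pathList.length + 1) path (PySem.Dict.mk cache)
      (pvCons_init _ _ _) (by omega)
      (Or.inr ⟨pathList.length, by omega, hres⟩)
    have hloop := pv_loopB endPath (PySem.Dict.mk cache) (PySem.Dict.mk pathList) pathList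
      (pv_items_mk pathList) (pv_items_mk' pathList hnd) path
      (pathList.length + 1) (PySem.Dict.mk cache) 0
      (pvCons_init _ _ _) (pvCovered_zero _ _ _)
    have hresf : pvResolvable endPath (PySem.Dict.mk cache) (PySem.Dict.mk pathList)
        (0 + (pathList.length + 1)) path = true := by
      refine pvResolvable_mono _ _ _ (by omega) path hres
    rcases hloop.2 hresf with h | h | h
    · exact absurd h h1
    · exact absurd h h2
    · rw [PySem.Dict.contains_eq_isSome_get?] at h
      rcases Option.isSome_iff_exists.mp h with ⟨v, hv⟩
      have hstB : pvStable endPath (PySem.Dict.mk cache) (PySem.Dict.mk pathList) path v :=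
        hloop.1.1 path v h1 h2 hv
      simp only [if_neg h1, if_neg h2, PySem.Dict.getD_eq_get?_getD, hv,
        Option.getD_some]
      exact pvStable_unique _ _ _ path _ _ hconsA.1 hstB
  · -- initially cached: both return the cached value
    simp [pvGoA, h1, h2, hget]
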